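-- pv_equiv track=rewrite | github.com/al3x030997/autoquery | scripts/canon_dryrun.py | tag_unmapped
-- ===== SOURCE A (Python) =====
-- LOCAL_EXTENSION_THRESHOLD = 5  # ≥5 distinct profiles
--
-- def tag_unmapped(
--     norm_term: str,
--     profile_count: int,
--     facet_aliases: dict[str, str],
-- ) -> str:
--     if profile_count >= LOCAL_EXTENSION_THRESHOLD:
--         return "LOCAL_candidate"
--     # Token-overlap heuristic for alias_candidate: does a canon entry share ≥1 word?
--     term_tokens = set(norm_term.split())
--     for canon_key in facet_aliases:
--         if term_tokens & set(canon_key.split()):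
--             return "alias_candidate"
--     return "dismiss"
-- ===== SOURCE B (Python) =====
-- LOCAL_EXTENSION_THRESHOLD = 5  # >=5 distinct profiles
--
--
-- def tag_unmapped(norm_term, profile_count, facet_aliases):
--     if profile_count >= LOCAL_EXTENSION_THRESHOLD:
--         return "LOCAL_candidate"
--     # sort-then-merge: sorted distinct token lists, two-pointer common-element scan
--     xs = sorted(set(norm_term.split()))
--     ys = sorted({tok for key in facet_aliases for tok in key.split()})
--     i = j = 0
--     while i < len(xs) and j < len(ys):
--         if xs[i] == ys[j]:
--             return "alias_candidate"
--         elif xs[i] < ys[j]: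
--             i += 1
--         else:
--             j += 1
--     return "dismiss"
-- ===== Notes on version B (the rewrite author's own statement) =====
-- stated objective: alternative
-- what changed: A scans the keys one by one, intersecting each key's hash-set of tokens with the term's set and returning early; B instead sorts the two distinct-token lists and detects a shared token with a two-pointer merge scan (no hashing, different traversal).
import Mathlib
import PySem

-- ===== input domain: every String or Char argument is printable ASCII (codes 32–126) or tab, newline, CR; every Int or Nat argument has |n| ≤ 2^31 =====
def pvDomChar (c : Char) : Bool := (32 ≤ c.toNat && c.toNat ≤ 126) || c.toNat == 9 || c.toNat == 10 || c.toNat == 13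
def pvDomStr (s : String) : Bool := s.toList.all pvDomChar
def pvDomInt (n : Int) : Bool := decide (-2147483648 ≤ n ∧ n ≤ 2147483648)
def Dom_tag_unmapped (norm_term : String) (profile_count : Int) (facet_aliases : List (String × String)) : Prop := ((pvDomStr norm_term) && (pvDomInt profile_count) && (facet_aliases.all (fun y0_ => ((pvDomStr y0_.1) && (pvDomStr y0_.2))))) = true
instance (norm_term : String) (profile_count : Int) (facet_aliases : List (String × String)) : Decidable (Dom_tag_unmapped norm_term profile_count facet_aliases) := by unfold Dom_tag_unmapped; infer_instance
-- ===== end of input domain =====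

-- B replaces A's per-key set-intersection scan by a different algorithm: sort the two
-- distinct-token lists and detect a shared token with a two-pointer merge scan
-- (objective: alternative).

-- ===== PORT A =====
-- the 'for canon_key in facet_aliases' loop with its early return
def tagLoopA (term_tokens : PySem.Set String) : List (String × String) → String
  | [] => "dismiss"
  | kv :: rest =>
    if PySem.Set.inter term_tokens (PySem.Set.ofList (PySem.Str.split₀ kv.1)) ≠ [] then
      "alias_candidate"
    else tagLoopA term_tokens rest

def tag_unmapped (norm_term : String) (profile_count : Int) (facet_aliases : List (String × String)) : String :=
  if profile_count ≥ 5 then "LOCAL_candidate"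
  else tagLoopA (PySem.Set.ofList (PySem.Str.split₀ norm_term)) facet_aliases

-- ===== PORT B =====
-- the two-pointer while loop over the two sorted lists (advancing an index = dropping a head)
def mergeScan : List String → List String → Bool
  | [], _ => false
  | _ :: _, [] => false
  | x :: xs, y :: ys =>
    if x == y then true
    else if x < y then mergeScan xs (y :: ys)
    else mergeScan (x :: xs) ys

def tag_unmapped_alt (norm_term : String) (profile_count : Int) (facet_aliases : List (String × String)) : String :=
  if profile_count ≥ 5 then "LOCAL_candidate"
  else
    let xs := PySem.List.sorted (PySem.Set.ofList (PySem.Str.split₀ norm_term)) (fun x => x) false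
    let ys := PySem.List.sorted
      (PySem.Set.ofList (facet_aliases.flatMap (fun kv => PySem.Str.split₀ kv.1)))
      (fun x => x) false
    if mergeScan xs ys then "alias_candidate" else "dismiss"

-- ===== PRECONDITION & SPEC =====
def Spec_tag_unmapped (norm_term : String) (profile_count : Int) (facet_aliases : List (String × String)) (out : String) : Prop := out = tag_unmapped_alt norm_term profile_count facet_aliases
instance (norm_term : String) (profile_count : Int) (facet_aliases : List (String × String)) (out : String) : Decidable (Spec_tag_unmapped norm_term profile_count facet_aliases out) := by unfold Spec_tag_unmapped; infer_instance

-- ===== CLAIM (what is proved, stated in full; the proofs are below) =====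
def Claim_equal_tag_unmapped : Prop := ∀ (norm_term : String) (profile_count : Int) (facet_aliases : List (String × String)), Dom_tag_unmapped norm_term profile_count facet_aliases → Spec_tag_unmapped norm_term profile_count facet_aliases (tag_unmapped norm_term profile_count facet_aliases)

-- ===== LEMMAS AND PROOFS =====

-- a set-intersection is nonempty iff the two sets share an element
theorem inter_ne_nil_iff (s t : List String) :
    PySem.Set.inter s t ≠ [] ↔ ∃ y, y ∈ s ∧ y ∈ t := by
  rw [← List.isEmpty_eq_false_iff, List.isEmpty_eq_false_iff_exists_mem]
  constructor
  · rintro ⟨y, hy⟩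
    exact ⟨y, (PySem.Set.mem_inter _ _ _).1 hy⟩
  · rintro ⟨y, hs, ht⟩
    exact ⟨y, (PySem.Set.mem_inter _ _ _).2 ⟨hs, ht⟩⟩

-- A's loop answers: does the term share a token with some key?
theorem loopA_eq (tt : PySem.Set String) (fs : List (String × String)) :
    tagLoopA tt fs =
      if ∃ y, y ∈ tt ∧ ∃ kv ∈ fs, y ∈ PySem.Str.split₀ kv.1 then "alias_candidate"
      else "dismiss" := by
  induction fs with
  | nil => simp [tagLoopA]
  | cons kv rest ih =>
    rw [tagLoopA, ih]
    by_cases h : PySem.Set.inter tt (PySem.Set.ofList (PySem.Str.split₀ kv.1)) ≠ []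
    · rcases (inter_ne_nil_iff _ _).1 h with ⟨y, hy, hm⟩
      rw [if_pos h, if_pos]
      exact ⟨y, hy, kv, List.mem_cons_self .., (PySem.Set.mem_ofList _ _).1 hm⟩
    · rw [if_neg h]
      congr 1
      simp only [eq_iff_iff]
      constructor
      · rintro ⟨y, hy, kv', hkv', hm⟩
        exact ⟨y, hy, kv', List.mem_cons_of_mem _ hkv', hm⟩
      · rintro ⟨y, hy, kv', hkv', hm⟩
        rcases List.mem_cons.1 hkv' with rfl | hkv'
        · exact absurd ((inter_ne_nil_iff _ _).2 ⟨y, hy, (PySem.Set.mem_ofList _ _).2 hm⟩) h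
        · exact ⟨y, hy, kv', hkv', hm⟩

-- on strictly increasing lists, the merge scan detects exactly a common element
theorem mergeScan_iff (xs ys : List String)
    (hx : xs.Pairwise (· < ·)) (hy : ys.Pairwise (· < ·)) :
    mergeScan xs ys = true ↔ ∃ z, z ∈ xs ∧ z ∈ ys := by
  fun_induction mergeScan xs ys with
  | case1 ys => simp [mergeScan]
  | case2 x xs => simp [mergeScan]
  | case3 x xs y ys heq =>
    simp only [true_iff, beq_iff_eq] at heq ⊢
    exact ⟨x, List.mem_cons_self .., heq ▸ List.mem_cons_self ..⟩
  | case4 x xs y ys heq hlt ih =>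
    rw [ih (List.Pairwise.of_cons hx) hy]
    constructor
    · rintro ⟨z, hz1, hz2⟩; exact ⟨z, List.mem_cons_of_mem _ hz1, hz2⟩
    · rintro ⟨z, hz1, hz2⟩
      rcases List.mem_cons.1 hz1 with rfl | hz1
      · rcases List.mem_cons.1 hz2 with rfl | hz2
        · simp at heq
        · exact absurd (lt_trans hlt (List.rel_of_pairwise_cons hy hz2)) (lt_irrefl z)
      · exact ⟨z, hz1, hz2⟩
  | case5 x xs y ys heq hlt ih =>
    rw [ih hx (List.Pairwise.of_cons hy)]
    have hyx : y < x := lt_of_le_of_ne (not_lt.1 hlt) (fun h => by simp [h] at heq)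
    constructor
    · rintro ⟨z, hz1, hz2⟩; exact ⟨z, hz1, List.mem_cons_of_mem _ hz2⟩
    · rintro ⟨z, hz1, hz2⟩
      rcases List.mem_cons.1 hz2 with rfl | hz2
      · rcases List.mem_cons.1 hz1 with rfl | hz1
        · exact absurd hyx (lt_irrefl z)
        · exact absurd (lt_trans hyx (List.rel_of_pairwise_cons hx hz1)) (lt_irrefl z)
      · exact ⟨z, hz1, hz2⟩

-- ===== VERDICT (by name: the statement is the Claim_ definition above) =====
theorem tag_unmapped_spec : Claim_equal_tag_unmapped := by
  intro norm_term profile_count facet_aliases _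
  unfold Spec_tag_unmapped tag_unmapped tag_unmapped_alt
  by_cases h : profile_count ≥ 5
  · simp [h]
  · simp only [h, if_false, loopA_eq,
      mergeScan_iff _ _ (PySem.List.sorted_ofList_pairwise_lt _)
        (PySem.List.sorted_ofList_pairwise_lt _),
      PySem.List.mem_sorted, PySem.Set.mem_ofList, List.mem_flatMap]
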